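-- pv_equiv track=rewrite | github.com/BatuOzmeteler/Previous-Projects | Python/14/try_3.py | findStringParam
-- ===== SOURCE A (Python) =====
-- def findStringParam(line):
--     string_param = ""
--     line_array = line.split(':')
--     for i in range(3, len(line_array)):
--         string_param = string_param + line_array[i]
--         if i != len(line_array)-1:
--             string_param = string_param + ":"
--
--     return string_param
-- ===== SOURCE B (Python) =====
-- def findStringParam(line):
--     parts = line.split(':', 3)
--     return parts[3] if len(parts) > 3 else ''
-- ===== Notes on version B (the rewrite author's own statement) =====
-- stated objective: simpler
-- what changed: Replaces the full colon split plus an index loop that re-joins the tail by a single bounded split with maxsplit 3 whose fourth element is already the joined remainder.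
import Mathlib
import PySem

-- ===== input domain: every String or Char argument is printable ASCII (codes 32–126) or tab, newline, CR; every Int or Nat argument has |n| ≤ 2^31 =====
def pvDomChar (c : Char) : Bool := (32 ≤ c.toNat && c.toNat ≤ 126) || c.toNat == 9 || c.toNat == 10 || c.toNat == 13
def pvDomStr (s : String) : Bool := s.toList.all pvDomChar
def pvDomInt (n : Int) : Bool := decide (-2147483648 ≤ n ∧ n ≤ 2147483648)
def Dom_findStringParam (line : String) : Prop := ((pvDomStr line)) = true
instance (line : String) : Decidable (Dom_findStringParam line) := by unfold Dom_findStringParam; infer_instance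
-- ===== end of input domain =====

-- B replaces A's full split plus an index loop re-joining the tail with colons by a single
-- bounded split(':', 3) whose fourth element is already the colon-joined remainder (simpler).

-- ===== PORT A =====
def findStringParam (line : String) : String :=
  let lineArray : List String := (PySem.Str.split? line ":").getD []
  (PySem.List.pyRange 3 (lineArray.length : Int) 1).foldl
    (fun stringParam i =>
      let stringParam := stringParam ++ PySem.List.pyGetD lineArray i ""
      if i ≠ (lineArray.length : Int) - 1 then stringParam ++ ":" else stringParam)
    ""

-- ===== PORT B =====
def findStringParam_alt (line : String) : String :=
  let parts : List String := (PySem.Str.splitMax? line ":" 3).getD []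
  if 3 < parts.length then PySem.List.pyGetD parts 3 "" else ""

-- ===== PRECONDITION & SPEC =====
def Spec_findStringParam (line : String) (out : String) : Prop := out = findStringParam_alt line
instance (line : String) (out : String) : Decidable (Spec_findStringParam line out) := by unfold Spec_findStringParam; infer_instance

-- ===== CLAIM (what is proved, stated in full; the proofs are below) =====
def Claim_equal_findStringParam : Prop := ∀ (line : String), Dom_findStringParam line → Spec_findStringParam line (findStringParam line)

-- ===== LEMMAS AND PROOFS =====

-- clean recursive models of split(':') and split(':', m), and of ':'-joining
def pvMapHead (f : List Char → List Char) : List (List Char) → List (List Char)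
  | [] => []
  | x :: xs => f x :: xs

def pvSpc : List Char → List (List Char)
  | [] => [[]]
  | c :: rest => if c = ':' then [] :: pvSpc rest else pvMapHead (c :: ·) (pvSpc rest)

def pvSpcMax : Nat → List Char → List (List Char)
  | 0, l => [l]
  | _+1, [] => [[]]
  | m+1, c :: rest => if c = ':' then [] :: pvSpcMax m rest else pvMapHead (c :: ·) (pvSpcMax (m+1) rest)

def pvJn : List (List Char) → List Char
  | [] => []
  | [x] => x
  | x :: y :: xs => x ++ ':' :: pvJn (y :: xs)

theorem pvSpc_ne_nil (l : List Char) : pvSpc l ≠ [] := by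
  cases l with
  | nil => simp [pvSpc]
  | cons c rest =>
    simp only [pvSpc]
    split
    · simp
    · cases h : pvSpc rest with
      | nil => exact absurd h (pvSpc_ne_nil rest)
      | cons x xs => simp [pvMapHead]

theorem pvSpcMax_ne_nil (m : Nat) (l : List Char) : pvSpcMax m l ≠ [] := by
  cases m with
  | zero => simp [pvSpcMax]
  | succ m' =>
    cases l with
    | nil => simp [pvSpcMax]
    | cons c rest =>
      simp only [pvSpcMax]
      split
      · simp
      · cases h : pvSpcMax (m'+1) rest with
        | nil => exact absurd h (pvSpcMax_ne_nil (m'+1) rest)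
        | cons x xs => simp [pvMapHead]

theorem pvMapHead_length (f : List Char → List Char) (xs : List (List Char)) :
    (pvMapHead f xs).length = xs.length := by
  cases xs <;> simp [pvMapHead]

-- the go loop of splitOn computes pvSpc
theorem pvGoA (fuel : Nat) : ∀ (l cur : List Char) (acc : List (List Char)),
    l.length < fuel →
    PySem.Chars.splitOn.go [':'] fuel l cur acc
      = acc.reverse ++ pvMapHead (cur.reverse ++ ·) (pvSpc l) := by
  induction fuel with
  | zero => intro l cur acc h; omega
  | succ n ih =>
    intro l cur acc h
    cases l with
    | nil => simp [PySem.Chars.splitOn.go, pvSpc, pvMapHead]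
    | cons c rest =>
      by_cases hc : c = ':'
      · subst hc
        have : PySem.Chars.splitOn.go [':'] (n+1) (':' :: rest) cur acc
            = PySem.Chars.splitOn.go [':'] n rest [] (cur.reverse :: acc) := by
          simp [PySem.Chars.splitOn.go, List.isPrefixOf]
        rw [this, ih rest [] (cur.reverse :: acc) (by simp at h ⊢; omega)]
        cases hs : pvSpc rest with
        | nil => exact absurd hs (pvSpc_ne_nil rest)
        | cons x xs => simp [pvSpc, pvMapHead, hs]
      · have : PySem.Chars.splitOn.go [':'] (n+1) (c :: rest) cur acc
            = PySem.Chars.splitOn.go [':'] n rest (c :: cur) acc := by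
          simp [PySem.Chars.splitOn.go, List.isPrefixOf, Ne.symm hc]
        rw [this, ih rest (c :: cur) acc (by simp at h ⊢; omega)]
        cases hs : pvSpc rest with
        | nil => exact absurd hs (pvSpc_ne_nil rest)
        | cons x xs => simp [pvSpc, pvMapHead, hs, hc]

-- the go loop of splitOnMax computes pvSpcMax
theorem pvGoMax (fuel : Nat) : ∀ (m : Nat) (l cur : List Char) (acc : List (List Char)),
    l.length < fuel →
    PySem.Chars.splitOnMax.go [':'] fuel m l cur acc
      = acc.reverse ++ pvMapHead (cur.reverse ++ ·) (pvSpcMax m l) := by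
  induction fuel with
  | zero => intro m l cur acc h; omega
  | succ n ih =>
    intro m l cur acc h
    cases l with
    | nil =>
      cases m <;> simp [PySem.Chars.splitOnMax.go, pvSpcMax, pvMapHead]
    | cons c rest =>
      cases m with
      | zero => simp [PySem.Chars.splitOnMax.go, pvSpcMax, pvMapHead]
      | succ m' =>
        by_cases hc : c = ':'
        · subst hc
          have : PySem.Chars.splitOnMax.go [':'] (n+1) (m'+1) (':' :: rest) cur acc
              = PySem.Chars.splitOnMax.go [':'] n m' rest [] (cur.reverse :: acc) := by
            simp [PySem.Chars.splitOnMax.go, List.isPrefixOf]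
          rw [this, ih m' rest [] (cur.reverse :: acc) (by simp at h ⊢; omega)]
          cases hs : pvSpcMax m' rest with
          | nil => exact absurd hs (pvSpcMax_ne_nil m' rest)
          | cons x xs => simp [pvSpcMax, pvMapHead, hs]
        · have : PySem.Chars.splitOnMax.go [':'] (n+1) (m'+1) (c :: rest) cur acc
              = PySem.Chars.splitOnMax.go [':'] n (m'+1) rest (c :: cur) acc := by
            simp [PySem.Chars.splitOnMax.go, List.isPrefixOf, Ne.symm hc]
          rw [this, ih (m'+1) rest (c :: cur) acc (by simp at h ⊢; omega)]
          cases hs : pvSpcMax (m'+1) rest with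
          | nil => exact absurd hs (pvSpcMax_ne_nil (m'+1) rest)
          | cons x xs => simp [pvSpcMax, pvMapHead, hs, hc]

theorem pvMapHead_id (xs : List (List Char)) : pvMapHead (fun x => x) xs = xs := by
  cases xs <;> simp [pvMapHead]

theorem pvSpc_eq_splitOn (s : List Char) : PySem.Chars.splitOn s [':'] = pvSpc s := by
  unfold PySem.Chars.splitOn
  rw [pvGoA (s.length + 1) s [] [] (by omega)]
  simp [pvMapHead_id]

theorem pvSpcMax_eq_splitOnMax (s : List Char) :
    PySem.Chars.splitOnMax s [':'] 3 = pvSpcMax 3 s := by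
  unfold PySem.Chars.splitOnMax
  rw [if_neg (by omega)]
  rw [pvGoMax (s.length + 1) (Int.toNat 3) s [] [] (by omega)]
  simp [pvMapHead_id]

theorem pvSpcMax_length (l : List Char) : ∀ m : Nat,
    (pvSpcMax m l).length = min (pvSpc l).length (m+1) := by
  induction l with
  | nil => intro m; cases m <;> simp [pvSpcMax, pvSpc]
  | cons c rest ih =>
    intro m
    cases m with
    | zero =>
      have h1 : 1 ≤ (pvSpc (c :: rest)).length := by
        cases hs : pvSpc (c :: rest) with
        | nil => exact absurd hs (pvSpc_ne_nil _)
        | cons x xs => simp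
      simp [pvSpcMax]; omega
    | succ m' =>
      by_cases hc : c = ':'
      · subst hc
        simp [pvSpcMax, pvSpc, ih m']
      · simp [pvSpcMax, pvSpc, hc, pvMapHead_length, ih (m'+1)]

theorem pvJn_mapHead_cons (c : Char) (x : List Char) (xs : List (List Char)) :
    pvJn ((c :: x) :: xs) = c :: pvJn (x :: xs) := by
  cases xs <;> simp [pvJn]

theorem pvJn_pvSpc (l : List Char) : pvJn (pvSpc l) = l := by
  induction l with
  | nil => simp [pvSpc, pvJn]
  | cons c rest ih =>
    by_cases hc : c = ':'
    · subst hc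
      simp only [pvSpc]
      cases hs : pvSpc rest with
      | nil => exact absurd hs (pvSpc_ne_nil rest)
      | cons x xs => rw [hs] at ih; simp [pvJn, ih]
    · simp only [pvSpc, if_neg hc]
      cases hs : pvSpc rest with
      | nil => exact absurd hs (pvSpc_ne_nil rest)
      | cons x xs => rw [hs] at ih; simp [pvMapHead, pvJn_mapHead_cons, ih]

-- element m of split(':', m) is the ':'-join of the tail of the full split
theorem pvGet (l : List Char) : ∀ m : Nat,
    (pvSpcMax m l).getD m [] = pvJn ((pvSpc l).drop m) := by
  induction l with
  | nil =>
    intro m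
    cases m <;> simp [pvSpcMax, pvSpc, pvJn, List.getD]
  | cons c rest ih =>
    intro m
    cases m with
    | zero =>
      simp only [pvSpcMax, List.drop_zero, List.getD, List.getElem?_cons_zero,
        Option.getD_some, pvJn_pvSpc]
    | succ m' =>
      by_cases hc : c = ':'
      · subst hc
        simp only [pvSpcMax, pvSpc, List.getD]
        simpa [List.getD] using ih m'
      · simp only [pvSpcMax, pvSpc, if_neg hc]
        cases hs : pvSpcMax (m'+1) rest with
        | nil => exact absurd hs (pvSpcMax_ne_nil (m'+1) rest)
        | cons x xs =>
          cases ht : pvSpc rest with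
          | nil => exact absurd ht (pvSpc_ne_nil rest)
          | cons y ys =>
            have := ih (m'+1)
            rw [hs, ht] at this
            simpa [pvMapHead, List.getD] using this

-- A's loop computes the ':'-join of P.drop k
theorem pvFoldA (P : List (List Char)) : ∀ (n k : Nat) (acc : String),
    P.length - k = n →
    ((PySem.List.pyRange (k : Int) ((P.map String.ofList).length : Int) 1).foldl
      (fun sp i =>
        let sp2 := sp ++ PySem.List.pyGetD (P.map String.ofList) i ""
        if i ≠ ((P.map String.ofList).length : Int) - 1 then sp2 ++ ":" else sp2) acc).toList
    = acc.toList ++ pvJn (P.drop k) := by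
  intro n
  induction n with
  | zero =>
    intro k acc h
    rw [PySem.List.pyRange_one_eq_nil
      (show (((P.map String.ofList).length : Int)) ≤ (k : Int) by
        simp only [List.length_map]; omega)]
    rw [List.drop_eq_nil_of_le (by omega)]
    simp [pvJn]
  | succ n ih =>
    intro k acc h
    have hk : k < P.length := by omega
    rw [PySem.List.pyRange_one_cons (by simp; omega)]
    simp only [List.foldl_cons]
    have hget : PySem.List.pyGetD (P.map String.ofList) (k : Int) ""
        = String.ofList P[k] := by
      rw [PySem.List.pyGetD_natCast]
      simp [List.getD, hk]
    by_cases hlast : k + 1 = P.length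
    · have hcond : ¬ ((k : Int) ≠ ((P.map String.ofList).length : Int) - 1) := by
        simp; omega
      rw [PySem.List.pyRange_one_eq_nil (by simp; omega)]
      have hdrop : P.drop k = [P[k]] := by
        rw [List.drop_eq_getElem_cons hk, List.drop_eq_nil_of_le (by omega)]
      simp only [List.foldl_nil, hget, hdrop, pvJn, if_neg hcond]
      simp
    · have hcond : ((k : Int) ≠ ((P.map String.ofList).length : Int) - 1) := by
        simp; omega
      rw [if_pos hcond]
      have : ((k : Int) + 1) = ((k + 1 : Nat) : Int) := by push_cast; ring
      rw [this, ih (k+1) _ (by omega)]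
      have hdrop : P.drop k = P[k] :: P.drop (k+1) := List.drop_eq_getElem_cons hk
      have hne : P.drop (k+1) ≠ [] := by
        simp only [ne_eq, List.drop_eq_nil_iff]; omega
      cases hd : P.drop (k+1) with
      | nil => exact absurd hd hne
      | cons y ys =>
        rw [hdrop, hd]
        simp [hget, pvJn]

theorem pvColon_toList : (":" : String).toList = [':'] := by decide

-- both programs return the ':'-join of the tail from index 3 of the full split
theorem pvA_toList (line : String) :
    (findStringParam line).toList = pvJn ((pvSpc line.toList).drop 3) := by
  unfold findStringParam
  have hsplit : (PySem.Str.split? line ":").getD []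
      = (pvSpc line.toList).map String.ofList := by
    unfold PySem.Str.split?
    rw [pvColon_toList]
    simp [PySem.Chars.split?, pvSpc_eq_splitOn]
  rw [hsplit]
  have := pvFoldA (pvSpc line.toList) ((pvSpc line.toList).length - 3) 3 "" rfl
  simpa using this

theorem pvB_toList (line : String) :
    (findStringParam_alt line).toList = pvJn ((pvSpc line.toList).drop 3) := by
  unfold findStringParam_alt
  have hsplit : (PySem.Str.splitMax? line ":" 3).getD []
      = (pvSpcMax 3 line.toList).map String.ofList := by
    unfold PySem.Str.splitMax?
    rw [pvColon_toList]
    simp [PySem.Chars.splitMax?, pvSpcMax_eq_splitOnMax]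
  rw [hsplit]
  by_cases hlen : 3 < (pvSpc line.toList).length
  · have hl : 3 < ((pvSpcMax 3 line.toList).map String.ofList).length := by
      simp [pvSpcMax_length]; omega
    rw [if_pos hl]
    have hget := pvGet line.toList 3
    have h3 : PySem.List.pyGetD ((pvSpcMax 3 line.toList).map String.ofList) 3 ""
        = String.ofList ((pvSpcMax 3 line.toList).getD 3 []) := by
      have : (3 : Int) = ((3 : Nat) : Int) := rfl
      rw [this, PySem.List.pyGetD_natCast]
      simp only [List.getD, List.getElem?_map]
      cases (pvSpcMax 3 line.toList)[3]? with
      | none => decide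
      | some x => simp
    rw [h3, hget]
    simp
  · have hl : ¬ 3 < ((pvSpcMax 3 line.toList).map String.ofList).length := by
      simp [pvSpcMax_length]; omega
    rw [if_neg hl]
    have hdrop : (pvSpc line.toList).drop 3 = [] :=
      List.drop_eq_nil_of_le (by omega)
    simp [hdrop, pvJn]

-- ===== VERDICT (by name: the statement is the Claim_ definition above) =====
theorem findStringParam_spec : Claim_equal_findStringParam := by
  intro line _
  unfold Spec_findStringParam
  apply String.toList_injective
  rw [pvA_toList, pvB_toList]
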